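-- pv_equiv track=rewrite | github.com/XHCFS/phishing-detector | app/database/enrich.py | extract_base_domain
-- ===== SOURCE A (Python) =====
-- def extract_base_domain(domain: str) -> str:
--     """Extract base domain from subdomain."""
--     if not domain:
--         return domain
--
--     # Multi-level TLDs like .co.uk, .ac.in, etc.
--     multi_level_tlds = [
--         '.co.uk', '.ac.uk', '.gov.uk', '.org.uk',
--         '.co.in', '.ac.in', '.gov.in',
--         '.co.jp', '.ac.jp', '.go.jp',
--         '.com.au', '.gov.au', '.edu.au',
--         '.co.nz', '.govt.nz', '.ac.nz',
--     ]
--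
--     domain_lower = domain.lower()
--     for tld in multi_level_tlds:
--         if domain_lower.endswith(tld):
--             # Get the part before this TLD
--             prefix = domain[:-(len(tld))]
--             # Split the prefix and take the last part
--             if '.' in prefix:
--                 base_name = prefix.rsplit('.', 1)[-1]
--                 return base_name + tld
--             # No subdomain, return as is
--             return domain
--
--     # Standard TLD case (e.g., .com, .org, .net)
--     parts = domain.split('.')
--     if len(parts) > 2:
--         # Return last two parts (example.com from mail.example.com)
--         return '.'.join(parts[-2:])
--
--     return domain
-- ===== SOURCE B (Python) =====
-- def extract_base_domain(domain: str) -> str: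
--     """Extract base domain from subdomain."""
--     labels = domain.split('.')
--     lower = [l.lower() for l in labels]
--     multi = {
--         ('co', 'uk'), ('ac', 'uk'), ('gov', 'uk'), ('org', 'uk'),
--         ('co', 'in'), ('ac', 'in'), ('gov', 'in'),
--         ('co', 'jp'), ('ac', 'jp'), ('go', 'jp'),
--         ('com', 'au'), ('gov', 'au'), ('edu', 'au'),
--         ('co', 'nz'), ('govt', 'nz'), ('ac', 'nz'),
--     }
--     if len(labels) >= 3 and (lower[-2], lower[-1]) in multi:
--         if len(labels) >= 4:
--             return labels[-3] + '.' + lower[-2] + '.' + lower[-1]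
--         return domain
--     if len(labels) > 2:
--         return labels[-2] + '.' + labels[-1]
--     return domain
-- ===== Notes on version B (the rewrite author's own statement) =====
-- stated objective: idiomatic
-- what changed: B splits the domain into labels once and decides the multi-level-TLD case by a set lookup on the lowercased last two labels plus a branch on the label count, instead of A's 16-iteration endswith suffix scan with slicing and rsplit.
import Mathlib
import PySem

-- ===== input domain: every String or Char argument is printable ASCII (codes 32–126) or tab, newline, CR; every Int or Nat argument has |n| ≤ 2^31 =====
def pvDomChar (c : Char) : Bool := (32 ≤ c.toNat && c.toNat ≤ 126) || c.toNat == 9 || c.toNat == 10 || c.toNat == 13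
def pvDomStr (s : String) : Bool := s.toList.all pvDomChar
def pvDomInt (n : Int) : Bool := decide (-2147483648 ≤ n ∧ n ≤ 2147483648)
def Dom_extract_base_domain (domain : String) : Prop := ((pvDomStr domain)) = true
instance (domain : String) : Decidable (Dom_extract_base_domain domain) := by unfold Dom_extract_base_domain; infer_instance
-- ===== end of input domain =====

-- B replaces A's 16-iteration endswith suffix scan (slice + rsplit) by one split into labels
-- and a set lookup on the lowercased last two labels (objective: idiomatic; same asymptotic cost).

-- ===== PORT A =====
-- the multi_level_tlds literal list of A
def pvTlds : List (List Char) :=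
  [".co.uk".toList, ".ac.uk".toList, ".gov.uk".toList, ".org.uk".toList,
   ".co.in".toList, ".ac.in".toList, ".gov.in".toList,
   ".co.jp".toList, ".ac.jp".toList, ".go.jp".toList,
   ".com.au".toList, ".gov.au".toList, ".edu.au".toList,
   ".co.nz".toList, ".govt.nz".toList, ".ac.nz".toList]

-- hand port of cs.rsplit('.', 1) (PySem has no rsplit): exact — one split at the LAST '.',
-- a list [before, after] if '.' occurs, else [cs], exactly like Python's rsplit with maxsplit=1
def pvRsplitDot1 (cs : List Char) : List (List Char) :=
  if PySem.Chars.isIn ['.'] cs then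
    let after := (cs.reverse.takeWhile (fun c => c ≠ '.')).reverse
    [cs.take (cs.length - after.length - 1), after]
  else [cs]

-- A's 'for tld in multi_level_tlds' loop with its early returns (none = fell through)
def pvLoopA (domain : String) (s sl : List Char) : List (List Char) → Option String
  | [] => none
  | tld :: rest =>
    if PySem.Chars.endswith sl tld then
      let pfx := PySem.Chars.slice s none (some (-(tld.length : Int)))
      if PySem.Chars.isIn ['.'] pfx then
        -- rsplit always returns a nonempty list, so Python's [-1] never raises; getD [] is unreachable
        some (String.ofList (((PySem.List.pyGet? (pvRsplitDot1 pfx) (-1)).getD []) ++ tld))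
      else some domain
    else pvLoopA domain s sl rest

def extract_base_domain (domain : String) : String :=
  if domain = "" then domain
  else
    let s := domain.toList
    let sl := PySem.Chars.lower s
    match pvLoopA domain s sl pvTlds with
    | some r => r
    | none =>
      let parts := PySem.Chars.splitOn s ['.']
      if 2 < parts.length then
        String.ofList (PySem.Chars.join ['.'] (PySem.List.slice parts (some (-2)) none))
      else domain

-- ===== PORT B =====
-- the set literal of two-element lowercase label tuples of B
def pvPairs : List (List Char × List Char) :=
  [("co".toList, "uk".toList), ("ac".toList, "uk".toList), ("gov".toList, "uk".toList), ("org".toList, "uk".toList),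
   ("co".toList, "in".toList), ("ac".toList, "in".toList), ("gov".toList, "in".toList),
   ("co".toList, "jp".toList), ("ac".toList, "jp".toList), ("go".toList, "jp".toList),
   ("com".toList, "au".toList), ("gov".toList, "au".toList), ("edu".toList, "au".toList),
   ("co".toList, "nz".toList), ("govt".toList, "nz".toList), ("ac".toList, "nz".toList)]

def extract_base_domain_alt (domain : String) : String :=
  let labels := PySem.Chars.splitOn domain.toList ['.']
  let lower := labels.map PySem.Chars.lower
  let multi := PySem.Set.ofList pvPairs
  -- negative indexing is guarded by the 3 ≤ length test, so getD [] is unreachable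
  if 3 ≤ labels.length ∧
      (((PySem.List.pyGet? lower (-2)).getD [], (PySem.List.pyGet? lower (-1)).getD []) ∈ multi) then
    if 4 ≤ labels.length then
      String.ofList ((PySem.List.pyGet? labels (-3)).getD [] ++
        '.' :: ((PySem.List.pyGet? lower (-2)).getD [] ++ '.' :: (PySem.List.pyGet? lower (-1)).getD []))
    else domain
  else if 2 < labels.length then
    String.ofList ((PySem.List.pyGet? labels (-2)).getD [] ++ '.' :: (PySem.List.pyGet? labels (-1)).getD [])
  else domain

-- ===== PRECONDITION & SPEC =====
def Spec_extract_base_domain (domain : String) (out : String) : Prop := out = extract_base_domain_alt domain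
instance (domain : String) (out : String) : Decidable (Spec_extract_base_domain domain out) := by unfold Spec_extract_base_domain; infer_instance

-- ===== CLAIM (what is proved, stated in full; the proofs are below) =====
def Claim_equal_extract_base_domain : Prop := ∀ (domain : String), Dom_extract_base_domain domain → Spec_extract_base_domain domain (extract_base_domain domain)

-- ===== LEMMAS AND PROOFS =====

theorem pv_lowerChar_dot (c : Char) : (PySem.Chars.lowerChar c = '.') ↔ c = '.' := by
  unfold PySem.Chars.lowerChar
  split_ifs with h
  · simp only [PySem.Chars.isupper, Bool.and_eq_true, decide_eq_true_eq, Char.le_def] at h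
    have hA : (65 : Nat) ≤ c.toNat := by
      have := h.1; exact_mod_cast this
    have hZ : c.toNat ≤ 90 := by
      have := h.2; exact_mod_cast this
    constructor
    · intro he
      have h2 := congrArg Char.toNat he
      rw [Char.toNat_ofNat] at h2
      have hv : (c.toNat + 32).isValidChar := by
        left; omega
      rw [if_pos hv] at h2
      have : ('.' : Char).toNat = 46 := by decide
      omega
    · intro he; subst he; exfalso
      have : ('.' : Char).toNat = 46 := by decide
      omega
  · simp

theorem pv_splitOn_go (fuel : ℕ) (l cur : List Char) (acc : List (List Char)) (h : l.length ≤ fuel) :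
    PySem.Chars.splitOn.go ['.'] fuel l cur acc
      = acc.reverse ++ (l.splitOn '.').modifyHead (cur.reverse ++ ·) := by
  induction fuel generalizing l cur acc with
  | zero =>
    have hl : l = [] := by
      cases l with
      | nil => rfl
      | cons a t => simp at h
    subst hl
    rw [PySem.Chars.splitOn.go.eq_def]
    simp [List.splitOn, List.splitOnP_nil]
  | succ fuel ih =>
    cases l with
    | nil =>
      rw [PySem.Chars.splitOn.go.eq_def]
      simp [List.splitOn, List.splitOnP_nil]
    | cons c rest =>
      rw [PySem.Chars.splitOn.go.eq_def]
      simp only [List.isPrefixOf, Bool.and_true]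
      by_cases hc : c = '.'
      · subst hc
        simp only [beq_self_eq_true, if_true]
        simp only [List.length_singleton, List.drop_succ_cons, List.drop_zero]
        rw [ih rest [] (cur.reverse :: acc) (by simpa using Nat.le_of_succ_le_succ h)]
        simp [List.splitOn, List.splitOnP_cons]
        cases hsp : List.splitOnP (fun x => x == '.') rest with
        | nil => exact absurd hsp (List.splitOnP_ne_nil _ _)
        | cons a t => simp
      · have hbeq : ('.' == c) = false := by
          rw [beq_eq_false_iff_ne]; exact Ne.symm hc
        rw [hbeq]
        simp only [Bool.false_eq_true, if_false]
        rw [ih rest (c :: cur) acc (by simpa using Nat.le_of_succ_le_succ h)]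
        simp only [List.splitOn, List.splitOnP_cons]
        have : (c == '.') = false := by simp [hc]
        rw [this]
        simp only [Bool.false_eq_true, if_false, List.modifyHead_modifyHead]
        congr 1
        cases hsp : List.splitOnP (fun x => x == '.') rest with
        | nil => exact absurd hsp (List.splitOnP_ne_nil _ _)
        | cons a t => simp

theorem pv_splitOn_dot (s : List Char) : PySem.Chars.splitOn s ['.'] = s.splitOn '.' := by
  show PySem.Chars.splitOn.go ['.'] (s.length + 1) s [] [] = _
  rw [pv_splitOn_go _ _ _ _ (by omega)]
  simp
  cases hsp : s.splitOn '.' with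
  | nil => exact absurd hsp (List.splitOnP_ne_nil _ _)
  | cons a t => simp

theorem pv_splitOn_map_lower (s : List Char) :
    (s.map PySem.Chars.lowerChar).splitOn '.' = (s.splitOn '.').map (List.map PySem.Chars.lowerChar) := by
  induction s with
  | nil => simp [List.splitOn, List.splitOnP_nil]
  | cons c rest ih =>
    simp only [List.map_cons, List.splitOn, List.splitOnP_cons] at *
    by_cases hc : c = '.'
    · subst hc
      have : PySem.Chars.lowerChar '.' = '.' := by decide
      rw [this]
      simp [ih]
    · have h1 : (PySem.Chars.lowerChar c == '.') = false := by
        simp only [beq_eq_false_iff_ne, ne_eq]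
        intro hh
        exact hc ((pv_lowerChar_dot c).mp hh)
      have h2 : (c == '.') = false := by simp [hc]
      rw [h1, h2]
      simp only [Bool.false_eq_true, if_false, ih]
      cases hsp : List.splitOnP (fun x => x == '.') rest with
      | nil => exact absurd hsp (List.splitOnP_ne_nil _ _)
      | cons a t => simp

theorem pv_dot_not_mem_splitOn (s : List Char) : ∀ p ∈ s.splitOn '.', '.' ∉ p := by
  induction s with
  | nil => simp [List.splitOn, List.splitOnP_nil]
  | cons c rest ih =>
    simp only [List.splitOn, List.splitOnP_cons] at *
    by_cases hc : c = '.'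
    · subst hc
      simp only [beq_self_eq_true, if_true]
      intro p hp
      rcases List.mem_cons.mp hp with h | h
      · subst h; simp
      · exact ih p h
    · have h2 : (c == '.') = false := by simp [hc]
      rw [h2]
      simp only [Bool.false_eq_true, if_false]
      intro p hp
      cases hsp : List.splitOnP (fun x => x == '.') rest with
      | nil => exact absurd hsp (List.splitOnP_ne_nil _ _)
      | cons a t =>
        rw [hsp] at hp
        simp only [List.modifyHead_cons] at hp
        rcases List.mem_cons.mp hp with h | h
        · subst h
          intro hm
          rcases List.mem_cons.mp hm with hm | hm
          · exact hc hm.symm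
          · exact ih a (by rw [hsp]; exact List.mem_cons_self ..) hm
        · exact ih p (by rw [hsp]; exact List.mem_cons_of_mem _ h)

theorem pv_join_append_singleton (q : List (List Char)) (p : List Char) (h : q ≠ []) :
    PySem.Chars.join ['.'] (q ++ [p]) = PySem.Chars.join ['.'] q ++ '.' :: p := by
  induction q with
  | nil => exact absurd rfl h
  | cons a t ih =>
    cases t with
    | nil => simp [PySem.Chars.join_cons_cons, PySem.Chars.join_singleton]
    | cons b t2 =>
      have h1 : (a :: b :: t2) ++ [p] = a :: b :: (t2 ++ [p]) := by simp
      rw [h1, PySem.Chars.join_cons_cons]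
      rw [show b :: (t2 ++ [p]) = (b :: t2) ++ [p] from rfl, ih (by simp),
        PySem.Chars.join_cons_cons]
      simp

theorem pv_join_append_pair (q : List (List Char)) (x y : List Char) (h : q ≠ []) :
    PySem.Chars.join ['.'] (q ++ [x, y]) = PySem.Chars.join ['.'] q ++ '.' :: (x ++ '.' :: y) := by
  have h1 : q ++ [x, y] = (q ++ [x]) ++ [y] := by simp
  rw [h1, pv_join_append_singleton _ _ (by simp), pv_join_append_singleton _ _ h]
  simp

theorem pv_isIn_dot (cs : List Char) : PySem.Chars.isIn ['.'] cs = true ↔ '.' ∈ cs := by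
  rw [PySem.Chars.isIn_iff_infix]
  constructor
  · rintro ⟨s, t, rfl⟩; simp
  · intro hm
    rcases List.append_of_mem hm with ⟨s, t, rfl⟩
    exact ⟨s, t, by simp⟩

theorem pv_takeWhile_nodot (xs r : List Char) (h : '.' ∉ xs) :
    (xs ++ '.' :: r).takeWhile (fun c => c ≠ '.') = xs := by
  induction xs with
  | nil => simp
  | cons a t ih =>
    have ha : a ≠ '.' := fun hh => h (hh ▸ List.mem_cons_self ..)
    rw [List.cons_append, List.takeWhile_cons]
    simp only [ha, ne_eq, not_false_eq_true, decide_true, if_true]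
    rw [ih (fun hm => h (List.mem_cons_of_mem _ hm))]

theorem pv_rsplit_last (q p : List Char) (hp : '.' ∉ p) :
    (PySem.List.pyGet? (pvRsplitDot1 (q ++ '.' :: p)) (-1)).getD [] = p := by
  have hin : PySem.Chars.isIn ['.'] (q ++ '.' :: p) = true := by
    rw [pv_isIn_dot]; simp
  unfold pvRsplitDot1
  rw [if_pos hin]
  have hrev : (q ++ '.' :: p).reverse = p.reverse ++ '.' :: q.reverse := by simp
  rw [hrev, pv_takeWhile_nodot _ _ (by simpa using hp), List.reverse_reverse]
  simp [PySem.List.pyGet?, PySem.List.pyIdx?]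

theorem pv_pyGet_neg {α : Type} (u v : List α) (k : Nat) (hk : 0 < k) (hv : v.length = k) :
    PySem.List.pyGet? (u ++ v) (-(k : Int)) = v[0]? := by
  simp only [PySem.List.pyGet?, PySem.List.pyIdx?, List.length_append, hv]
  rw [if_neg (by omega), if_pos (by push_cast; omega)]
  simp only [Option.bind_some, Int.neg_neg, Int.toNat_natCast]
  rw [List.getElem?_append_right (by omega)]
  congr 1
  omega

theorem pv_suffix_iff (s x y : List Char) (hx : '.' ∉ x) (hy : '.' ∉ y) :
    ('.' :: (x ++ '.' :: y)) <:+ s ↔ ∃ pre, s.splitOn '.' = pre ++ [x, y] ∧ pre ≠ [] := by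
  constructor
  · rintro ⟨r, rfl⟩
    refine ⟨(r.splitOn '.'), ?_, List.splitOnP_ne_nil _ _⟩
    have h1 : r ++ '.' :: (x ++ '.' :: y) = r ++ '.' :: (x ++ '.' :: y) := rfl
    show (r ++ '.' :: (x ++ '.' :: y)).splitOn '.' = _
    rw [List.splitOn, List.splitOnP_append_cons _ _ _ _ (by simp)]
    congr 1
    rw [List.splitOnP_first _ _ (by intro c hc; simp; exact fun hh => hx (hh ▸ hc)) '.' (by simp)]
    congr 1
    exact List.splitOnP_eq_single _ _ (by intro c hc; simp; exact fun hh => hy (hh ▸ hc))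
  · rintro ⟨pre, hsp, hpre⟩
    have hs : PySem.Chars.join ['.'] (s.splitOn '.') = s := List.intercalate_splitOn s '.'
    rw [hsp, pv_join_append_pair _ _ _ hpre] at hs
    exact ⟨PySem.Chars.join ['.'] pre, hs⟩

def pvBody (domain : String) (s la lb : List Char) : String :=
  let t := '.' :: (la ++ '.' :: lb)
  let pfx := PySem.Chars.slice s none (some (-(t.length : Int)))
  if PySem.Chars.isIn ['.'] pfx then
    String.ofList (((PySem.List.pyGet? (pvRsplitDot1 pfx) (-1)).getD []) ++ t)
  else domain

theorem pv_pyGet_neg1 {α : Type} (u : List α) (x : α) :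
    PySem.List.pyGet? (u ++ [x]) (-1) = some x := by
  have h := pv_pyGet_neg u [x] 1 (by omega) rfl
  norm_num at h
  simpa using h

theorem pv_pyGet_neg2 {α : Type} (u : List α) (x y : α) :
    PySem.List.pyGet? (u ++ [x, y]) (-2) = some x := by
  have h := pv_pyGet_neg u [x, y] 2 (by omega) rfl
  norm_num at h
  simpa using h

theorem pv_pyGet_neg3 {α : Type} (u : List α) (x y z : α) :
    PySem.List.pyGet? (u ++ [x, y, z]) (-3) = some x := by
  have h := pv_pyGet_neg u [x, y, z] 3 (by omega) rfl
  norm_num at h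
  simpa using h

theorem pv_loopA_none (domain : String) (s sl : List Char) (T : List (List Char))
    (h : ∀ t ∈ T, PySem.Chars.endswith sl t = false) : pvLoopA domain s sl T = none := by
  induction T with
  | nil => rfl
  | cons t rest ih =>
    unfold pvLoopA
    rw [h t (List.mem_cons_self ..)]
    simp only [Bool.false_eq_true, if_false]
    exact ih (fun t' ht' => h t' (List.mem_cons_of_mem _ ht'))

theorem pv_loopA_spec (domain : String) (s sl : List Char) (P : List (List Char × List Char))
    (la lb : List Char)
    (hguard : ∀ q ∈ P, PySem.Chars.endswith sl ('.' :: (q.1 ++ '.' :: q.2)) = decide (la = q.1 ∧ lb = q.2)) :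
    pvLoopA domain s sl (P.map (fun q => '.' :: (q.1 ++ '.' :: q.2)))
      = if (la, lb) ∈ P then some (pvBody domain s la lb) else none := by
  induction P with
  | nil => simp [pvLoopA]
  | cons q P ih =>
    simp only [List.map_cons]
    unfold pvLoopA
    rw [hguard q (List.mem_cons_self ..)]
    by_cases heq : la = q.1 ∧ lb = q.2
    · rw [decide_eq_true heq]
      simp only [if_true]
      have hql : (la, lb) ∈ q :: P := by
        rcases heq with ⟨h1, h2⟩
        have : q = (la, lb) := by rw [h1, h2]
        exact this ▸ List.mem_cons_self ..
      rw [if_pos hql]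
      rcases heq with ⟨h1, h2⟩
      simp only [pvBody, h1, h2]
      split_ifs <;> rfl
    · rw [decide_eq_false heq]
      simp only [Bool.false_eq_true, if_false]
      rw [ih (fun q' hq' => hguard q' (List.mem_cons_of_mem _ hq'))]
      have : ((la, lb) ∈ q :: P) ↔ ((la, lb) ∈ P) := by
        constructor
        · intro hm
          rcases List.mem_cons.mp hm with hm | hm
          · exfalso; exact heq ⟨(congrArg Prod.fst hm).symm ▸ rfl, (congrArg Prod.snd hm).symm ▸ rfl⟩
          · exact hm
        · exact List.mem_cons_of_mem _
      by_cases hm : (la, lb) ∈ P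
      · rw [if_pos hm, if_pos (this.mpr hm)]
      · rw [if_neg hm, if_neg (fun hh => hm (this.mp hh))]

theorem pv_decomp (L : List (List Char)) (h : 2 ≤ L.length) :
    ∃ pre a b, L = pre ++ [a, b] ∧ pre.length = L.length - 2 := by
  cases hr : L.reverse with
  | nil => rw [← L.reverse_reverse, hr] at h; simp at h
  | cons b r2 =>
    cases r2 with
    | nil =>
      rw [← L.reverse_reverse, hr] at h; simp at h
    | cons a rr =>
      refine ⟨rr.reverse, a, b, ?_, ?_⟩
      · rw [← L.reverse_reverse, hr]; simp
      · have : L.length = L.reverse.length := by simp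
        rw [this, hr]; simp


theorem pvTldsEq : pvTlds = pvPairs.map (fun q => '.' :: (q.1 ++ '.' :: q.2)) := by decide

theorem pvPairsFree : ∀ q ∈ pvPairs, '.' ∉ q.1 ∧ '.' ∉ q.2 := by decide

theorem pv_guard (s : List Char) (pre : List (List Char)) (a b x y : List Char)
    (hL : s.splitOn '.' = pre ++ [a, b]) (hpre : pre ≠ [])
    (hx : '.' ∉ x) (hy : '.' ∉ y) :
    PySem.Chars.endswith (PySem.Chars.lower s) ('.' :: (x ++ '.' :: y))
      = decide (a.map PySem.Chars.lowerChar = x ∧ b.map PySem.Chars.lowerChar = y) := by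
  have hmap : (s.map PySem.Chars.lowerChar).splitOn '.'
      = (pre.map (List.map PySem.Chars.lowerChar)) ++ [a.map PySem.Chars.lowerChar, b.map PySem.Chars.lowerChar] := by
    rw [pv_splitOn_map_lower, hL]; simp
  rw [Bool.eq_iff_iff, decide_eq_true_eq, PySem.Chars.endswith_iff]
  have hlow : PySem.Chars.lower s = s.map PySem.Chars.lowerChar := rfl
  rw [hlow, pv_suffix_iff _ x y hx hy]
  constructor
  · rintro ⟨pre', hsp', hpre'⟩
    rw [hmap] at hsp'
    have hlen : (pre.map (List.map PySem.Chars.lowerChar)).length = pre'.length := by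
      have h0 := congrArg List.length hsp'
      simp only [List.length_append, List.length_map, List.length_cons, List.length_nil] at h0 ⊢
      omega
    rcases List.append_inj hsp' hlen with ⟨-, h2⟩
    have := List.cons.injEq .. ▸ h2
    constructor
    · exact (List.cons_eq_cons.mp h2).1
    · have h3 := (List.cons_eq_cons.mp h2).2
      simpa using h3
  · rintro ⟨h1, h2⟩
    exact ⟨pre.map (List.map PySem.Chars.lowerChar), by rw [hmap, h1, h2], by simpa using hpre⟩

theorem pv_guard_short (s : List Char) (h : (s.splitOn '.').length < 3) (x y : List Char)
    (hx : '.' ∉ x) (hy : '.' ∉ y) :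
    PySem.Chars.endswith (PySem.Chars.lower s) ('.' :: (x ++ '.' :: y)) = false := by
  rw [Bool.eq_false_iff]
  intro hc
  rw [PySem.Chars.endswith_iff] at hc
  have hlow : PySem.Chars.lower s = s.map PySem.Chars.lowerChar := rfl
  rw [hlow, pv_suffix_iff _ x y hx hy] at hc
  rcases hc with ⟨pre, hsp, hpre⟩
  have h1 : (s.map PySem.Chars.lowerChar).splitOn '.' = (s.splitOn '.').map (List.map PySem.Chars.lowerChar) :=
    pv_splitOn_map_lower s
  rw [h1] at hsp
  have h2 := congrArg List.length hsp
  simp at h2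
  have : pre.length ≠ 0 := fun hh => hpre (List.length_eq_zero_iff.mp hh)
  omega

-- ===== VERDICT (by name: the statement is the Claim_ definition above) =====
theorem extract_base_domain_spec : Claim_equal_extract_base_domain := by
  unfold Claim_equal_extract_base_domain
  intro domain _
  unfold Spec_extract_base_domain extract_base_domain extract_base_domain_alt
  by_cases hdom : domain = ""
  · subst hdom; decide
  · rw [if_neg hdom]
    simp only [pv_splitOn_dot]
    set s := domain.toList with hs
    set L := List.splitOn '.' s with hL
    have hLnil : L ≠ [] := List.splitOnP_ne_nil _ _
    have hfree : ∀ p ∈ L, '.' ∉ p := by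
      intro p hp; exact pv_dot_not_mem_splitOn s p (by rw [← hL]; exact hp)
    by_cases h3 : 3 ≤ L.length
    · obtain ⟨pre, a, b, hdec, hplen⟩ := pv_decomp L (by omega)
      have hpre : pre ≠ [] := by
        intro hh; rw [hh] at hplen; simp at hplen; omega
      set la := a.map PySem.Chars.lowerChar with hla
      set lb := b.map PySem.Chars.lowerChar with hlb
      have ha : '.' ∉ a := hfree a (by rw [hdec]; simp)
      have hb : '.' ∉ b := hfree b (by rw [hdec]; simp)
      have hguard : ∀ q ∈ pvPairs,
          PySem.Chars.endswith (PySem.Chars.lower s) ('.' :: (q.1 ++ '.' :: q.2))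
            = decide (la = q.1 ∧ lb = q.2) := by
        intro q hq
        exact pv_guard s pre a b q.1 q.2 (by rw [← hL]; exact hdec) hpre
          (pvPairsFree q hq).1 (pvPairsFree q hq).2
      rw [pvTldsEq, pv_loopA_spec domain s (PySem.Chars.lower s) pvPairs la lb hguard]
      have hmapL : List.map PySem.Chars.lower L
          = (pre.map (List.map PySem.Chars.lowerChar)) ++ [la, lb] := by
        rw [hdec]; simp only [List.map_append, List.map_cons, List.map_nil]; rfl
      have hg2 : (PySem.List.pyGet? (List.map PySem.Chars.lower L) (-2)).getD [] = la := by
        rw [hmapL, pv_pyGet_neg2]; rfl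
      have hg1 : (PySem.List.pyGet? (List.map PySem.Chars.lower L) (-1)).getD [] = lb := by
        rw [hmapL, show (pre.map (List.map PySem.Chars.lowerChar)) ++ [la, lb]
          = ((pre.map (List.map PySem.Chars.lowerChar)) ++ [la]) ++ [lb] by simp, pv_pyGet_neg1]
        rfl
      rw [hg2, hg1]
      have hjoin : PySem.Chars.join ['.'] L = s := by
        rw [hL]; exact List.intercalate_splitOn s '.'
      have hsplit_s : s = PySem.Chars.join ['.'] pre ++ '.' :: (a ++ '.' :: b) := by
        rw [← hjoin, hdec, pv_join_append_pair _ _ _ hpre]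
      have hlen_t : ('.' :: (la ++ '.' :: lb)).length = a.length + b.length + 2 := by
        simp [hla, hlb]; omega
      have hslice : PySem.Chars.slice s none (some (-(('.' :: (la ++ '.' :: lb)).length : Int)))
          = PySem.Chars.join ['.'] pre := by
        rw [hlen_t]
        rw [show PySem.Chars.slice s none (some (-((a.length + b.length + 2 : Nat) : Int)))
            = PySem.List.slice s none (some (-((a.length + b.length + 2 : Nat) : Int))) by
          simp]
        rw [PySem.List.slice_to_neg_natCast _ _ (by omega)]
        rw [hsplit_s]
        have hlen2 : (PySem.Chars.join ['.'] pre ++ '.' :: (a ++ '.' :: b)).length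
            - (a.length + b.length + 2) = (PySem.Chars.join ['.'] pre).length := by
          simp; omega
        rw [hlen2, List.take_left]
      by_cases hmem : (la, lb) ∈ pvPairs
      · have heq : (if (la, lb) ∈ pvPairs then some (pvBody domain s la lb) else none)
            = some (pvBody domain s la lb) := if_pos hmem
        simp only [heq]
        have hcond : 3 ≤ L.length ∧
            ((la, lb) ∈ PySem.Set.ofList pvPairs) := ⟨h3, (PySem.Set.mem_ofList _ _).mpr hmem⟩
        rw [if_pos hcond]
        unfold pvBody
        simp only [hslice]
        by_cases h4 : 4 ≤ L.length
        · have hp2 : 2 ≤ pre.length := by omega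
          obtain ⟨pre', p, rfl⟩ : ∃ pre' p, pre = pre' ++ [p] := by
            cases hpp : pre.reverse with
            | nil => rw [← pre.reverse_reverse, hpp] at hp2; simp at hp2
            | cons p rr => exact ⟨rr.reverse, p, by rw [← pre.reverse_reverse, hpp]; simp⟩
          have hpre' : pre' ≠ [] := by
            intro hh; rw [hh] at hp2; simp at hp2
          have hp : '.' ∉ p := hfree p (by rw [hdec]; simp)
          rw [pv_join_append_singleton _ _ hpre']
          rw [if_pos (by rw [pv_isIn_dot]; simp)]
          rw [pv_rsplit_last _ _ hp]
          rw [if_pos h4]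
          rw [hdec, show (pre' ++ [p]) ++ [a, b] = pre' ++ [p, a, b] by simp, pv_pyGet_neg3]
          rfl
        · have hp1 : pre.length = 1 := by omega
          obtain ⟨p, rfl⟩ : ∃ p, pre = [p] := by
            cases pre with
            | nil => simp at hp1
            | cons p t =>
              cases t with
              | nil => exact ⟨p, rfl⟩
              | cons q t2 => simp at hp1
          have hp : '.' ∉ p := hfree p (by rw [hdec]; simp)
          rw [PySem.Chars.join_singleton]
          rw [if_neg (by rw [Bool.not_eq_true, Bool.eq_false_iff]; intro hh; exact hp ((pv_isIn_dot p).mp hh))]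
          rw [if_neg h4]
      · have heq : (if (la, lb) ∈ pvPairs then some (pvBody domain s la lb) else none)
            = (none : Option String) := if_neg hmem
        simp only [heq]
        have hncond : ¬(3 ≤ L.length ∧
            ((la, lb) ∈ PySem.Set.ofList pvPairs)) :=
          fun hh => hmem ((PySem.Set.mem_ofList _ _).mp hh.2)
        rw [if_neg hncond]
        have h2 : 2 < L.length := by omega
        rw [if_pos h2, if_pos h2]
        have hdrop : PySem.List.slice L (some (-2)) none = [a, b] := by
          rw [PySem.List.slice_from_neg_ofNat L 2 (by omega)]
          rw [show L.length - 2 = pre.length by omega, hdec, List.drop_left]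
        rw [hdrop]
        rw [PySem.Chars.join_cons_cons, PySem.Chars.join_singleton]
        rw [hdec, pv_pyGet_neg2,
          show pre ++ [a, b] = (pre ++ [a]) ++ [b] by simp, pv_pyGet_neg1]
        simp
    · have hnone : pvLoopA domain s (PySem.Chars.lower s) pvTlds = none := by
        apply pv_loopA_none
        intro t ht
        rw [pvTldsEq] at ht
        rcases List.mem_map.mp ht with ⟨q, hq, rfl⟩
        exact pv_guard_short s (by rw [← hL]; omega) q.1 q.2 (pvPairsFree q hq).1 (pvPairsFree q hq).2
      simp only [hnone]
      have hncond : ¬(3 ≤ L.length ∧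
          (((PySem.List.pyGet? (List.map PySem.Chars.lower L) (-2)).getD [],
            (PySem.List.pyGet? (List.map PySem.Chars.lower L) (-1)).getD [])
              ∈ PySem.Set.ofList pvPairs)) := fun hh => h3 hh.1
      rw [if_neg hncond]
      have h2 : ¬(2 < L.length) := by omega
      rw [if_neg h2, if_neg h2]
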